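-- pv_equiv track=rewrite | github.com/kleine2/ovos-technical-manual | tools/generate_pdf.py | paginate_lines
-- ===== SOURCE A (Python) =====
-- from typing import List, Sequence, Tuple
--
-- PAGE_HEIGHT = 792  # 11in * 72pt
--
-- MARGIN = 50
--
-- LINE_HEIGHT = 14
--
-- def paginate_lines(lines: Sequence[str]) -> List[List[Tuple[str, int]]]:
--     pages: List[List[Tuple[str, int]]] = []
--     y = PAGE_HEIGHT - MARGIN
--     current: List[Tuple[str, int]] = []
--     for line in lines:
--         if y < MARGIN:
--             pages.append(current)
--             current = []
--             y = PAGE_HEIGHT - MARGIN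
--         current.append((line, y))
--         y -= LINE_HEIGHT
--     if current:
--         pages.append(current)
--     return pages
-- ===== SOURCE B (Python) =====
-- from typing import List, Sequence, Tuple
--
-- PAGE_HEIGHT = 792
-- MARGIN = 50
-- LINE_HEIGHT = 14
--
-- def paginate_lines(lines: Sequence[str]) -> List[List[Tuple[str, int]]]:
--     # Each page holds exactly 50 lines; y is a closed form of the index in the chunk.
--     lines = list(lines)
--     pages: List[List[Tuple[str, int]]] = []
--     i = 0
--     while i < len(lines):
--         pages.append([(ln, PAGE_HEIGHT - MARGIN - LINE_HEIGHT * j)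
--                       for j, ln in enumerate(lines[i:i + 50])])
--         i += 50
--     return pages
-- ===== Notes on version B (the rewrite author's own statement) =====
-- stated objective: alternative
-- what changed: Replaces the running y-coordinate state machine (decrement y, flush when y < MARGIN) with arithmetic chunking: the list is split into exact 50-line chunks and each line's y is computed in closed form as PAGE_HEIGHT - MARGIN - LINE_HEIGHT * (index in chunk).
import Mathlib
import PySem

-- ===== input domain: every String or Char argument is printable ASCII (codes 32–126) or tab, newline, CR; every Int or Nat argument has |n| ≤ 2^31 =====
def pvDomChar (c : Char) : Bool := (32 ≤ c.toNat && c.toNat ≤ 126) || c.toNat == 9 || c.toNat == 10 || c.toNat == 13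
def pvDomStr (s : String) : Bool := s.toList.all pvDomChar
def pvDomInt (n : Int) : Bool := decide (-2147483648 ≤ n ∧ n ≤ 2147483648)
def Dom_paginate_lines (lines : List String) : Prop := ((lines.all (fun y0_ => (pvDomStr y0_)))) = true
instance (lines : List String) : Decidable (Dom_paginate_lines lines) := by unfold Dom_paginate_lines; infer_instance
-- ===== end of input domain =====

-- B replaces A's running-y state machine by exact 50-line chunking with a closed-form y (alternative, same cost).

def pvPAGE_HEIGHT : Int := 792
def pvMARGIN : Int := 50
def pvLINE_HEIGHT : Int := 14

-- ===== PORT A =====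
-- state: (pages, y, current)
def pvStepA (st : List (List (String × Int)) × Int × List (String × Int)) (line : String) :
    List (List (String × Int)) × Int × List (String × Int) :=
  let st := if st.2.1 < pvMARGIN then
      (st.1 ++ [st.2.2], pvPAGE_HEIGHT - pvMARGIN, ([] : List (String × Int)))
    else st
  (st.1, st.2.1 - pvLINE_HEIGHT, st.2.2 ++ [(line, st.2.1)])

def pvFinishA (st : List (List (String × Int)) × Int × List (String × Int)) :
    List (List (String × Int)) :=
  if st.2.2 ≠ [] then st.1 ++ [st.2.2] else st.1

def paginate_lines (lines : List String) : List (List (String × Int)) :=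
  pvFinishA (lines.foldl pvStepA ([], pvPAGE_HEIGHT - pvMARGIN, []))

-- ===== PORT B =====
-- i = 0; while i < len(lines): pages.append([... enumerate(lines[i:i+50]) ...]); i += 50
-- (i only ever holds 0, 50, 100, …, so it is carried as a Nat and cast at the slice)
def pvAltLoop (lines : List String) (i : Nat) (pages : List (List (String × Int))) :
    List (List (String × Int)) :=
  if i < lines.length then
    pvAltLoop lines (i + 50)
      (pages ++ [(PySem.List.enumerate (PySem.List.slice lines (some (i : Int)) (some ((i : Int) + 50)))).map
        (fun p => (p.2, pvPAGE_HEIGHT - pvMARGIN - pvLINE_HEIGHT * p.1))])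
  else pages
termination_by lines.length - i

def paginate_lines_alt (lines : List String) : List (List (String × Int)) :=
  pvAltLoop lines 0 []

-- ===== PRECONDITION & SPEC =====
def Spec_paginate_lines (lines : List String) (out : List (List (String × Int))) : Prop := out = paginate_lines_alt lines
instance (lines : List String) (out : List (List (String × Int))) : Decidable (Spec_paginate_lines lines out) := by unfold Spec_paginate_lines; infer_instance

-- ===== CLAIM (what is proved, stated in full; the proofs are below) =====
def Claim_equal_paginate_lines : Prop := ∀ (lines : List String), Dom_paginate_lines lines → Spec_paginate_lines lines (paginate_lines lines)

-- ===== LEMMAS AND PROOFS =====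

-- proof-side spec: 50-line chunks with y attached positionally
def pvAttachY (c : Nat) : List String → List (String × Int)
  | [] => []
  | l :: ls => (l, 742 - 14 * (c : Int)) :: pvAttachY (c + 1) ls

def pvChunks (lines : List String) : List (List (String × Int)) :=
  match lines with
  | [] => []
  | l :: ls => ((l, 742) :: pvAttachY 1 (ls.take 49)) :: pvChunks (ls.drop 49)
termination_by lines.length
decreasing_by simp [List.length_drop]

lemma pvChunks_nil : pvChunks [] = [] := by rw [pvChunks.eq_def]

lemma pvChunks_cons (l : String) (ls : List String) :
    pvChunks (l :: ls) = ((l, 742) :: pvAttachY 1 (ls.take 49)) :: pvChunks (ls.drop 49) := by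
  rw [pvChunks.eq_def]

lemma pvEnumerate_map_eq_attachY (xs : List String) (s : Nat) :
    (PySem.List.enumerate xs (s : Int)).map
      (fun p => (p.2, pvPAGE_HEIGHT - pvMARGIN - pvLINE_HEIGHT * p.1)) = pvAttachY s xs := by
  induction xs generalizing s with
  | nil => simp [PySem.List.enumerate_nil, pvAttachY]
  | cons x xs ih =>
    rw [PySem.List.enumerate_cons]
    have h2 := ih (s + 1)
    push_cast at h2
    norm_num [pvPAGE_HEIGHT, pvMARGIN, pvLINE_HEIGHT] at h2
    simp only [List.map_cons, pvAttachY, pvPAGE_HEIGHT, pvMARGIN, pvLINE_HEIGHT]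
    norm_num
    exact h2

lemma pvChunks_ne_nil (xs : List String) (h : xs ≠ []) :
    pvChunks xs = pvAttachY 0 (xs.take 50) :: pvChunks (xs.drop 50) := by
  cases xs with
  | nil => exact absurd rfl h
  | cons l ls =>
    rw [pvChunks_cons]
    have h2 : (l :: ls).take 50 = l :: ls.take 49 := rfl
    have h3 : (l :: ls).drop 50 = ls.drop 49 := rfl
    rw [h2, h3]
    simp [pvAttachY]

lemma pvAltLoop_eq (lines : List String) (i : Nat) (pages : List (List (String × Int))) :
    pvAltLoop lines i pages = pages ++ pvChunks (lines.drop i) := by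
  induction hn : lines.length - i using Nat.strong_induction_on generalizing i pages with
  | _ n ih =>
  by_cases hi : i < lines.length
  · rw [pvAltLoop, if_pos hi]
    rw [ih ((lines.length - (i + 50))) (by omega) (i + 50) _ rfl]
    have hsl : PySem.List.slice lines (some (i : Int)) (some ((i : Int) + 50))
        = (lines.drop i).take 50 := by
      have e1 : ((i : Int)).toNat = i := by omega
      have e2 : (((i : Int) + 50)).toNat = i + 50 := by omega
      rw [PySem.List.slice_toNat lines (by positivity) (by positivity), e1, e2]
      congr 1
      omega
    rw [hsl]
    have h4 := pvEnumerate_map_eq_attachY ((lines.drop i).take 50) 0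
    simp only [Nat.cast_zero] at h4
    rw [h4]
    have hne : lines.drop i ≠ [] := by
      intro h
      have := congrArg List.length h
      simp at this
      omega
    rw [pvChunks_ne_nil _ hne]
    have hdd : (lines.drop i).drop 50 = lines.drop (i + 50) := by
      rw [List.drop_drop]
    rw [hdd]
    simp [List.append_assoc]
  · rw [pvAltLoop, if_neg hi]
    have : lines.drop i = [] := List.drop_eq_nil_of_le (by omega)
    rw [this, pvChunks_nil]
    simp

-- main invariant for A's fold
lemma pvFoldA_eq (rest : List String) (cur : List (String × Int))
    (pages : List (List (String × Int))) (h1 : 1 ≤ cur.length) (h50 : cur.length ≤ 50) :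
    pvFinishA (rest.foldl pvStepA (pages, 742 - 14 * (cur.length : Int), cur)) =
      pages ++ (cur ++ pvAttachY cur.length (rest.take (50 - cur.length)))
        :: pvChunks (rest.drop (50 - cur.length)) := by
  induction rest generalizing cur pages with
  | nil =>
    have hc : cur ≠ [] := by intro h; subst h; simp at h1
    simp only [List.foldl_nil, pvFinishA, List.take_nil, List.drop_nil, pvChunks_nil]
    have ha : pvAttachY cur.length [] = [] := rfl
    simp [hc, ha]
  | cons l rs ih =>
    simp only [List.foldl_cons]
    by_cases hfull : cur.length = 50
    · -- page is full: the step flushes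
      have hy : (742 - 14 * (cur.length : Int)) < 50 := by rw [hfull]; norm_num
      have hstep : pvStepA (pages, 742 - 14 * (cur.length : Int), cur) l
          = (pages ++ [cur], 742 - 14 * ((1 : Nat) : Int), [(l, 742)]) := by
        simp only [pvStepA, pvPAGE_HEIGHT, pvMARGIN, pvLINE_HEIGHT]
        rw [if_pos hy]
        norm_num
      rw [hstep]
      have key := ih [(l, 742)] (pages ++ [cur]) (by simp) (by simp)
      simp only [List.length_cons, List.length_nil] at key
      rw [key, hfull]
      simp only [Nat.sub_self, List.take_zero, List.drop_zero]
      rw [pvChunks_cons]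
      have ha : pvAttachY 0 [] = [] := rfl
      simp [pvAttachY, List.append_assoc]
    · -- page not full: append to current
      have hy : ¬ ((742 - 14 * (cur.length : Int)) < 50) := by omega
      have hstep : pvStepA (pages, 742 - 14 * (cur.length : Int), cur) l
          = (pages, 742 - 14 * (cur.length : Int) - 14,
             cur ++ [(l, 742 - 14 * (cur.length : Int))]) := by
        simp only [pvStepA, pvPAGE_HEIGHT, pvMARGIN, pvLINE_HEIGHT]
        rw [if_neg hy]
      rw [hstep]
      have hycast : 742 - 14 * (cur.length : Int) - 14
          = 742 - 14 * (((cur.length + 1 : Nat)) : Int) := by push_cast; ring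
      rw [hycast]
      have key := ih (cur ++ [(l, 742 - 14 * (cur.length : Int))]) pages
        (by simp) (by simp only [List.length_append, List.length_cons, List.length_nil]; omega)
      simp only [List.length_append, List.length_cons, List.length_nil] at key
      rw [key]
      have htake : (l :: rs).take (50 - cur.length) = l :: rs.take (49 - cur.length) := by
        have h : 50 - cur.length = (49 - cur.length) + 1 := by omega
        rw [h]; rfl
      have hdrop : (l :: rs).drop (50 - cur.length) = rs.drop (49 - cur.length) := by
        have h : 50 - cur.length = (49 - cur.length) + 1 := by omega
        rw [h]; rfl
      have h49 : 50 - (cur.length + 1) = 49 - cur.length := by omega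
      rw [htake, hdrop, h49]
      simp only [pvAttachY, List.append_assoc, List.cons_append, List.nil_append]

lemma pvA_eq_chunks (lines : List String) : paginate_lines lines = pvChunks lines := by
  cases lines with
  | nil => simp [paginate_lines, pvFinishA, pvChunks_nil]
  | cons l ls =>
    unfold paginate_lines
    simp only [List.foldl_cons]
    have hstep : pvStepA ([], pvPAGE_HEIGHT - pvMARGIN, []) l
        = ([], 742 - 14 * ((1 : Nat) : Int), [(l, 742)]) := by
      simp only [pvStepA, pvPAGE_HEIGHT, pvMARGIN, pvLINE_HEIGHT]
      norm_num
    rw [hstep]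
    have key := pvFoldA_eq ls [(l, 742)] [] (by simp) (by simp)
    simp only [List.length_cons, List.length_nil] at key
    rw [key, pvChunks_cons]
    simp

-- ===== VERDICT (by name: the statement is the Claim_ definition above) =====
theorem paginate_lines_spec : Claim_equal_paginate_lines := by
  intro lines _
  unfold Spec_paginate_lines paginate_lines_alt
  rw [pvAltLoop_eq, pvA_eq_chunks]
  simp
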